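-- pv_equiv track=rewrite | github.com/mtasa-typescript/mtasa-wiki-parser | to_typescript/src/function_gen.py | docs_post_processing
-- ===== SOURCE A (Python) =====
-- def docs_post_processing(docs: str) -> str:
--     MAX_LINE_LENGTH = 100
--
--     lines = docs.split('\n')
--     new_lines = []
--
--     for line in lines:
--         new_line = ''
--         i = 0
--
--         for i in range(MAX_LINE_LENGTH, len(line), MAX_LINE_LENGTH):
--             partial_docs = line[i - MAX_LINE_LENGTH:i]
--             new_line += '\n* '.join(partial_docs.rsplit(' ', 1))
--
--         if i < len(line):
--             new_line += line[i:]
--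
--         new_lines.append(new_line)
--
--     return '\n'.join(new_lines)
-- ===== SOURCE B (Python) =====
-- def docs_post_processing(docs: str) -> str:
--     # One streaming pass per line over its characters: no slicing, no rsplit.
--     # Track the buffer index of the last space seen in the current 100-char block;
--     # when a 101st character arrives, splice '\n* ' over that space and start a
--     # new block. A final block (including an exact 100-char one) is never wrapped
--     # because no further character arrives to close it.
--     out = []
--     for line in docs.split('\n'):
--         buf = []
--         last_space = -1
--         count = 0
--         for ch in line:
--             if count == 100:
--                 if last_space >= 0:
--                     buf[last_space:last_space + 1] = ['\n', '*', ' ']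
--                 last_space = -1
--                 count = 0
--             buf.append(ch)
--             if ch == ' ':
--                 last_space = len(buf) - 1
--             count += 1
--         out.append(''.join(buf))
--     return '\n'.join(out)
-- ===== Notes on version B (the rewrite author's own statement) =====
-- stated objective: alternative
-- what changed: Replaces A's per-chunk slicing loop (slice 100 chars, rsplit at the last space, join) by a single streaming pass over each line's characters that tracks the index of the last space in the current block and splices '\n* ' over it the moment a 101st character arrives; no slicing or rsplit at all.
import Mathlib
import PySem

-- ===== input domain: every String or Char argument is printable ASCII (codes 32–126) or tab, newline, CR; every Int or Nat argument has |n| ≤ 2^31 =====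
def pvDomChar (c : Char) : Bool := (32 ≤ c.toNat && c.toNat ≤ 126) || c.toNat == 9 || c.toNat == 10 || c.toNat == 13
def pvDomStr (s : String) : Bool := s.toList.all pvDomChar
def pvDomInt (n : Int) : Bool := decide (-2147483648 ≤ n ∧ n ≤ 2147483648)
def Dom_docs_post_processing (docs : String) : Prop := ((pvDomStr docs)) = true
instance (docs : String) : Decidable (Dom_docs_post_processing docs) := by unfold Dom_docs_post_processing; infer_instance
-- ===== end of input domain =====

-- B replaces A's per-chunk slicing loop (slice, rsplit at the last space, join) by a single
-- streaming pass over each line's characters that tracks the last-space index of the current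
-- 100-char block and splices '\n* ' over it when a 101st character arrives.

-- ===== PORT A =====
-- port of the expression  '\n* '.join(x.rsplit(' ', 1))  (rsplit is not in PySem; hand port,
-- exact: rsplit(' ', 1) splits at the LAST space, if any)
def rsplitJoin (c : List Char) : List Char :=
  match c.reverse.idxOf? ' ' with
  | none => c
  | some k => c.take (c.length - k - 1) ++ ('\n' :: '*' :: ' ' :: []) ++ c.drop (c.length - k)

-- the body of A's `for line in lines` loop (the inner range loop carries (new_line, i) as state)
def procA (line : List Char) : List Char :=
  let st := (PySem.List.pyRange 100 (line.length : Int) 100).foldl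
      (fun (p : List Char × Int) i =>
        (p.1 ++ rsplitJoin (PySem.List.slice line (some (i - 100)) (some i)), i))
      ([], 0)
  if st.2 < (line.length : Int) then st.1 ++ PySem.List.slice line (some st.2) none else st.1

def docs_post_processing (docs : String) : String :=
  let lines := PySem.Chars.splitOn docs.toList ['\n']
  let new_lines := lines.foldl (fun acc line => acc ++ [procA line]) []
  String.ofList (PySem.Chars.join ['\n'] new_lines)

-- ===== PORT B =====
-- `buf[last_space:last_space+1] = ['\n', '*', ' ']` (a splice over one element)
def wrapAt (buf : List Char) (ls : Int) : List Char :=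
  if 0 ≤ ls then buf.take ls.toNat ++ '\n' :: '*' :: ' ' :: buf.drop (ls.toNat + 1) else buf

-- the body of B's inner `for ch in line` loop; state = (buf, last_space, count)
def stepB (st : List Char × Int × Int) (ch : Char) : List Char × Int × Int :=
  let st := if st.2.2 = 100 then (wrapAt st.1 st.2.1, (-1 : Int), (0 : Int)) else st
  let buf := st.1 ++ [ch]
  let ls := if ch = ' ' then ((buf.length : Int) - 1) else st.2.1
  (buf, ls, st.2.2 + 1)

def procB (line : List Char) : List Char :=
  (line.foldl stepB ([], -1, 0)).1

def docs_post_processing_alt (docs : String) : String :=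
  String.ofList (PySem.Chars.join ['\n']
    ((PySem.Chars.splitOn docs.toList ['\n']).map procB))

-- ===== PRECONDITION & SPEC =====
def Spec_docs_post_processing (docs : String) (out : String) : Prop := out = docs_post_processing_alt docs
instance (docs : String) (out : String) : Decidable (Spec_docs_post_processing docs out) := by unfold Spec_docs_post_processing; infer_instance

-- ===== CLAIM (what is proved, stated in full; the proofs are below) =====
def Claim_equal_docs_post_processing : Prop := ∀ (docs : String), Dom_docs_post_processing docs → Spec_docs_post_processing docs (docs_post_processing docs)

-- ===== LEMMAS AND PROOFS =====

-- common reference function: wrap every full 100-char chunk that is followed by more text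
def wrapSpec (l : List Char) : List Char :=
  if _h : l.length ≤ 100 then l
  else rsplitJoin (l.take 100) ++ wrapSpec (l.drop 100)
termination_by l.length
decreasing_by simp; omega

-- index of the LAST space of a list, counted from the front
def lsIdx : List Char → Option Nat
  | [] => none
  | ch :: t => match lsIdx t with
      | some j => some (j + 1)
      | none => if ch = ' ' then some 0 else none

-- index of the FIRST space, counted from the front
def fsIdx : List Char → Option Nat
  | [] => none
  | ch :: t => if ch = ' ' then some 0 else (fsIdx t).map (· + 1)

theorem lsIdx_lt (c : List Char) (j : Nat) (h : lsIdx c = some j) : j < c.length := by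
  induction c generalizing j with
  | nil => simp [lsIdx] at h
  | cons ch t ih =>
    simp only [lsIdx] at h
    cases ht : lsIdx t with
    | some j' => rw [ht] at h; simp at h; have := ih j' ht; simp; omega
    | none =>
      rw [ht] at h
      by_cases hc : ch = ' '
      · rw [if_pos hc] at h
        injection h with h'
        simp [List.length_cons]
        omega
      · rw [if_neg hc] at h
        exact absurd h (by simp)

theorem idxOf?_eq_fsIdx (l : List Char) : l.idxOf? ' ' = fsIdx l := by
  induction l with
  | nil => rfl
  | cons ch t ih =>
    by_cases h : ch = ' ' <;> simp [fsIdx, List.idxOf?_cons, h, ih]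

theorem fsIdx_append (a b : List Char) :
    fsIdx (a ++ b) = match fsIdx a with
      | some j => some j
      | none => (fsIdx b).map (· + a.length) := by
  induction a with
  | nil => simp only [List.nil_append]; cases h : fsIdx b <;> simp [fsIdx]
  | cons ch t ih =>
    by_cases h : ch = ' '
    · simp [fsIdx, h]
    · simp only [List.cons_append, fsIdx, if_neg h, ih]
      cases ht : fsIdx t with
      | some j => simp
      | none => cases fsIdx b <;> simp [List.length_cons] <;> omega

theorem fsIdx_reverse (c : List Char) :
    fsIdx c.reverse = (lsIdx c).map (fun j => c.length - 1 - j) := by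
  induction c with
  | nil => rfl
  | cons ch t ih =>
    rw [List.reverse_cons, fsIdx_append, ih]
    cases ht : lsIdx t with
    | some j =>
      have := lsIdx_lt t j ht
      simp [lsIdx, ht, List.length_cons]
      omega
    | none =>
      by_cases h : ch = ' ' <;> simp [lsIdx, ht, fsIdx, h]

theorem rsplitJoin_eq (c : List Char) :
    rsplitJoin c = match lsIdx c with
      | none => c
      | some j => c.take j ++ '\n' :: '*' :: ' ' :: c.drop (j + 1) := by
  unfold rsplitJoin
  rw [idxOf?_eq_fsIdx, fsIdx_reverse]
  cases hl : lsIdx c with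
  | none => simp
  | some j =>
    have hj := lsIdx_lt c j hl
    simp only [Option.map_some]
    have h1 : c.length - (c.length - 1 - j) - 1 = j := by omega
    have h2 : c.length - (c.length - 1 - j) = j + 1 := by omega
    rw [h1, h2]
    simp

-- `last_space` tracking as performed by the fold, in closed form
def lastSp (n : Nat) (ls : Int) : List Char → Int
  | [] => ls
  | ch :: t => lastSp (n + 1) (if ch = ' ' then (n : Int) else ls) t

theorem lastSp_eq (c : List Char) (n : Nat) (ls : Int) :
    lastSp n ls c = match lsIdx c with
      | some j => (n : Int) + (j : Int)
      | none => ls := by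
  induction c generalizing n ls with
  | nil => simp [lastSp, lsIdx]
  | cons ch t ih =>
    simp only [lastSp, lsIdx, ih]
    cases lsIdx t with
    | some j => push_cast; ring_nf
    | none => by_cases h : ch = ' ' <;> simp [h]

-- folding a block of ≤ 100 chars from a fresh-block state just appends and tracks the space
theorem foldB_block (c : List Char) (buf : List Char) (ls : Int) (cnt : Int)
    (h0 : 0 ≤ cnt) (h1 : cnt + c.length ≤ 100) :
    c.foldl stepB (buf, ls, cnt) = (buf ++ c, lastSp buf.length ls c, cnt + c.length) := by
  induction c generalizing buf ls cnt with
  | nil => simp [lastSp]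
  | cons ch t ih =>
    simp only [List.length_cons] at h1
    rw [List.foldl_cons]
    have hstep : stepB (buf, ls, cnt) ch
        = (buf ++ [ch], (if ch = ' ' then (buf.length : Int) else ls), cnt + 1) := by
      simp only [stepB, if_neg (by omega : ¬ cnt = 100)]
      simp only [List.length_append, List.length_cons, List.length_nil]
      push_cast
      ring_nf
    rw [hstep, ih (buf ++ [ch]) _ (cnt + 1) (by omega) (by push_cast at h1 ⊢; omega)]
    simp only [List.append_assoc, List.singleton_append, List.length_append,
      List.length_cons, List.length_nil, lastSp, Prod.mk.injEq]
    refine ⟨trivial, by norm_num, by push_cast; ring⟩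

-- a wrapped block equals A's rsplit-join of that block
theorem wrapAt_eq (buf c : List Char) :
    wrapAt (buf ++ c) (lastSp buf.length (-1) c) = buf ++ rsplitJoin c := by
  rw [lastSp_eq, rsplitJoin_eq]
  cases hl : lsIdx c with
  | none => simp [wrapAt]
  | some j =>
    have hj := lsIdx_lt c j hl
    simp only [wrapAt]
    rw [if_pos (by positivity)]
    have ht : ((buf.length : Int) + (j : Int)).toNat = buf.length + j := by omega
    have hd : buf.length + j + 1 = buf.length + (j + 1) := by omega
    rw [ht, List.take_append, hd, List.drop_append,
        List.take_of_length_le (by omega), List.drop_eq_nil_of_le (by omega)]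
    simp

-- closing a full block: with more characters to come, the pending wrap fires first
theorem foldB_wrap (rest : List Char) (buf : List Char) (ls : Int) (h : rest ≠ []) :
    rest.foldl stepB (buf, ls, 100) = rest.foldl stepB (wrapAt buf ls, -1, 0) := by
  cases rest with
  | nil => exact absurd rfl h
  | cons ch t => simp [List.foldl_cons, stepB]

theorem procB_eq_wrapSpec_aux (line : List Char) (buf : List Char) :
    (line.foldl stepB (buf, -1, 0)).1 = buf ++ wrapSpec line := by
  by_cases h : line.length ≤ 100
  · rw [foldB_block line buf (-1) 0 le_rfl (by omega), wrapSpec, dif_pos h]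
  · have hsplit : line = line.take 100 ++ line.drop 100 := (List.take_append_drop 100 line).symm
    have hlt : (line.take 100).length = 100 := by simp; omega
    have hrest : line.drop 100 ≠ [] := by
      intro hc
      have := congrArg List.length hc
      simp at this
      omega
    conv_lhs => rw [hsplit]
    rw [List.foldl_append,
        foldB_block (line.take 100) buf (-1) 0 le_rfl (by rw [hlt]; norm_num)]
    rw [show ((0 : Int) + ((line.take 100).length : Int)) = 100 by rw [hlt]; norm_num]
    rw [foldB_wrap _ _ _ hrest, wrapAt_eq,
        procB_eq_wrapSpec_aux (line.drop 100) (buf ++ rsplitJoin (line.take 100))]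
    conv_rhs => rw [wrapSpec]
    rw [dif_neg h]
    simp
termination_by line.length
decreasing_by simp; omega

theorem foldl_append_last (g : Int → List Char) (r : List Int)
    (acc : List Char) (i0 : Int) :
    r.foldl (fun (p : List Char × Int) i => (p.1 ++ g i, i)) (acc, i0)
      = (acc ++ (r.map g).flatten, r.getLast?.getD i0) := by
  induction r generalizing acc i0 with
  | nil => simp
  | cons x t ih => simp [ih, List.getLast?_cons]

theorem chunk_eq (l : List Char) (j : Nat) :
    PySem.List.slice l (some ((100:Int)*j)) (some ((100:Int)*j + 100)) = (l.drop (100*j)).take 100 := by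
  have := PySem.List.slice_natCast_add l (100*j) 100
  push_cast at this
  simpa using this

theorem procA_closed (l : List Char) (h0 : 0 < l.length) :
    procA l = ((List.range ((l.length - 1)/100)).map
        (fun k => rsplitJoin ((l.drop (100*k)).take 100))).flatten
      ++ l.drop (100*((l.length - 1)/100)) := by
  by_cases h1 : l.length ≤ 100
  · have hA : PySem.List.pyRange 100 (l.length:Int) 100 = [] := by
      rw [PySem.List.pyRange_of_pos _ _ (by norm_num)]
      rw [if_neg (by exact_mod_cast not_lt.mpr h1)]
      simp
    have hm0 : (l.length - 1)/100 = 0 := by omega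
    simp only [procA, hA, List.foldl_nil, hm0]
    rw [if_pos (by exact_mod_cast h0)]
    simp [PySem.List.slice_some_none, PySem.List.clampIdx]
  · rw [not_le] at h1
    obtain ⟨m', hm'⟩ : ∃ m', (l.length - 1)/100 = m' + 1 := ⟨(l.length - 1)/100 - 1, by omega⟩
    have hA : PySem.List.pyRange 100 (l.length:Int) 100
        = (List.range ((l.length - 1)/100)).map (fun (k : Nat) => (100:Int) + 100*(k:Int)) := by
      rw [PySem.List.pyRange_of_pos _ _ (by norm_num)]
      rw [if_pos (by exact_mod_cast h1)]
      have hcount : (((l.length:Int) - 100 + 100 - 1)/100).toNat = (l.length - 1)/100 := by omega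
      rw [hcount]
    simp only [procA, hA]
    rw [foldl_append_last]
    rw [hm', List.range_succ]
    simp only [List.map_append, List.map_cons, List.map_nil, List.getLast?_append,
      List.getLast?_singleton, Option.some_or, Option.getD_some, List.nil_append]
    rw [if_pos (by exact_mod_cast (by omega : 100 + 100*(m':Int) < (l.length:Int)))]
    have htail : PySem.List.slice l (some (100 + 100*(m':Int))) none = l.drop (100*(m'+1)) := by
      rw [show (100 + 100*(m':Int)) = ((100+100*m' : ℕ) : Int) by push_cast; ring]
      rw [PySem.List.slice_from_natCast l _]
      congr 1
      ring
    rw [htail]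
    have hy : rsplitJoin (PySem.List.slice l (some ((100:Int) + 100*(m':Int) - 100))
          (some ((100:Int) + 100*(m':Int)))) = rsplitJoin ((l.drop (100*m')).take 100) := by
      rw [show (100:Int) + 100*(m':Int) - 100 = 100*(m':Int) by ring,
          show (100:Int) + 100*(m':Int) = 100*(m':Int) + 100 by ring, chunk_eq]
    have hX : List.map (fun i => rsplitJoin (PySem.List.slice l (some (i - 100)) (some i)))
          (List.map (fun (k : Nat) => (100:Int) + 100*(k:Int)) (List.range m'))
        = List.map (fun k => rsplitJoin ((l.drop (100*k)).take 100)) (List.range m') := by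
      rw [List.map_map]
      apply List.map_congr_left
      intro k _
      simp only [Function.comp_apply]
      rw [show (100:Int) + 100*(k:Int) - 100 = 100*(k:Int) by ring,
          show (100:Int) + 100*(k:Int) = 100*(k:Int) + 100 by ring, chunk_eq]
    rw [hy, hX]

theorem wrapSpec_closed (l : List Char) :
    wrapSpec l = ((List.range ((l.length - 1)/100)).map
        (fun k => rsplitJoin ((l.drop (100*k)).take 100))).flatten
      ++ l.drop (100*((l.length - 1)/100)) := by
  by_cases h : l.length ≤ 100
  · have hm0 : (l.length - 1)/100 = 0 := by omega
    rw [wrapSpec, dif_pos h, hm0]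
    simp
  · rw [wrapSpec, dif_neg h, wrapSpec_closed (l.drop 100)]
    have hm : (l.length - 1)/100 = ((l.drop 100).length - 1)/100 + 1 := by
      simp only [List.length_drop]
      omega
    rw [hm, List.range_succ_eq_map]
    simp only [List.map_cons, List.map_map, List.flatten_cons, List.append_assoc]
    have hmap : List.map ((fun k => rsplitJoin (List.take 100 (List.drop (100 * k) l))) ∘ Nat.succ)
        (List.range (((l.drop 100).length - 1) / 100))
        = List.map (fun k => rsplitJoin (List.take 100 (List.drop (100 * k) (l.drop 100))))
        (List.range (((l.drop 100).length - 1) / 100)) := by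
      apply List.map_congr_left
      intro k _
      simp only [Function.comp_apply, List.drop_drop]
      congr 3
      omega
    have htail : l.drop (100 * (((l.drop 100).length - 1) / 100 + 1))
        = (l.drop 100).drop (100 * (((l.drop 100).length - 1) / 100)) := by
      rw [List.drop_drop]
      congr 1
      omega
    rw [hmap, htail]
    simp
termination_by l.length
decreasing_by simp; omega

theorem procA_eq_wrapSpec (l : List Char) : procA l = wrapSpec l := by
  by_cases h0 : l.length = 0
  · rw [List.length_eq_zero_iff] at h0
    subst h0
    have hw : wrapSpec ([] : List Char) = [] := by rw [wrapSpec]; simp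
    rw [hw]
    decide
  · rw [procA_closed l (Nat.pos_of_ne_zero h0), wrapSpec_closed l]

theorem procA_eq_procB (l : List Char) : procA l = procB l := by
  rw [procA_eq_wrapSpec]
  unfold procB
  rw [procB_eq_wrapSpec_aux l []]
  simp

-- ===== VERDICT (by name: the statement is the Claim_ definition above) =====
theorem docs_post_processing_spec : Claim_equal_docs_post_processing := by
  intro docs _
  unfold Spec_docs_post_processing docs_post_processing docs_post_processing_alt
  simp only [PySem.List.foldl_append_singleton_eq_map, List.nil_append]
  rw [List.map_congr_left (fun l _ => procA_eq_procB l)]
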